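-- pv_equiv track=rewrite | github.com/danshen22nian/CR360 | 3.Fusion-Net/Fusion-net_type1/metric/NEW_MetricTT.py | two_twoRelation
-- ===== SOURCE A (Python) =====
-- def two_twoRelation(nameOrder, valueOrder):
--
--     new_nameList = []
--     set_valueOrder = valueOrder.copy()
--     set_valueOrder = sorted(list(set(set_valueOrder)), reverse=True)
--
--     for index in range(0, len(set_valueOrder)):
--         cur_value = set_valueOrder[index]
--         inner_list = []
--         for i in range(0, len(valueOrder)):
--             if cur_value == valueOrder[i]:
--                 inner_list.append(nameOrder[i])
--
--         new_nameList.append(inner_list)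
--
--     relation_list = []
--     for i in range(0, len(new_nameList)):
--         former_list = new_nameList[i]
--         start = i + 1
--         if i + 1 <= len(new_nameList):
--             for index in range(start, len(new_nameList)):
--                 last_list = new_nameList[index]
--                 for former_index in range(0, len(former_list)):
--                     former_ele = former_list[former_index]
--                     for last_index in range(0, len(last_list)):
--                         last_ele = last_list[last_index]
--                         ele_list = []
--                         ele_list.append(former_ele)
--                         ele_list.append(last_ele)
--                         relation_list.append(ele_list)
--
--     return relation_list
-- ===== SOURCE B (Python) =====
-- def two_twoRelation(nameOrder, valueOrder):
--     # one-pass dict grouping (value -> names in original order), then pair phase over group suffixes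
--     pairs = [(v, nameOrder[i]) for i, v in enumerate(valueOrder)]
--     buckets = {}
--     for v, name in pairs:
--         buckets.setdefault(v, []).append(name)
--     groups = [buckets[v] for v in sorted(buckets, reverse=True)]
--     out = []
--     while groups:
--         former, groups = groups[0], groups[1:]
--         for last in groups:
--             for f in former:
--                 for l in last:
--                     out.append([f, l])
--     return out
-- ===== Notes on version B (the rewrite author's own statement) =====
-- stated objective: faster
-- what changed: Grouping is done in one pass with a dict keyed by value (instead of re-scanning the whole value list once per distinct value), and the pair-emission phase walks group suffixes recursively instead of double index loops over the group list.
import Mathlib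
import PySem

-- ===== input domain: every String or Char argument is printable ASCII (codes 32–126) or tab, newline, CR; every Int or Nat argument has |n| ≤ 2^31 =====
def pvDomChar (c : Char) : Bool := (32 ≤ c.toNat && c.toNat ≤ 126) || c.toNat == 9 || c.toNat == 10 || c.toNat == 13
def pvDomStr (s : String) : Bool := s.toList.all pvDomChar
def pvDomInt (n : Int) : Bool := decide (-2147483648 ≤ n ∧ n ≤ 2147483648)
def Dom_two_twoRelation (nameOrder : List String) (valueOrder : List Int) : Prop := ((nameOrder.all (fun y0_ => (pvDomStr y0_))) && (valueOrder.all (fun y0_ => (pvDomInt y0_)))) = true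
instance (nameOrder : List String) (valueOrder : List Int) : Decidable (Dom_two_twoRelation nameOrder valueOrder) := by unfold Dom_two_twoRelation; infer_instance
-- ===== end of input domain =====

-- B replaces A's per-distinct-value rescan of valueOrder by a single dict-grouping pass
-- and walks group suffixes recursively in the pair phase (objective: faster).

-- ===== PORT A =====
def two_twoRelation (nameOrder : List String) (valueOrder : List Int) : List (List String) :=
  let set_valueOrder := PySem.List.sorted (PySem.Set.ofList valueOrder) (fun x => x) true
  let new_nameList :=
    (PySem.List.pyRange 0 (set_valueOrder.length : Int) 1).foldl (fun new_nameList index =>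
      let cur_value := PySem.List.pyGetD set_valueOrder index 0
      let inner_list :=
        (PySem.List.pyRange 0 (valueOrder.length : Int) 1).foldl (fun inner_list i =>
          if cur_value == PySem.List.pyGetD valueOrder i 0 then
            inner_list ++ [PySem.List.pyGetD nameOrder i ""]
          else inner_list) []
      new_nameList ++ [inner_list]) []
  (PySem.List.pyRange 0 (new_nameList.length : Int) 1).foldl (fun relation_list i =>
    let former_list := PySem.List.pyGetD new_nameList i []
    let start := i + 1
    if i + 1 ≤ (new_nameList.length : Int) then
      (PySem.List.pyRange start (new_nameList.length : Int) 1).foldl (fun relation_list index =>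
        let last_list := PySem.List.pyGetD new_nameList index []
        (PySem.List.pyRange 0 (former_list.length : Int) 1).foldl (fun relation_list former_index =>
          let former_ele := PySem.List.pyGetD former_list former_index ""
          (PySem.List.pyRange 0 (last_list.length : Int) 1).foldl (fun relation_list last_index =>
            let last_ele := PySem.List.pyGetD last_list last_index ""
            let ele_list := [former_ele, last_ele]
            relation_list ++ [ele_list]) relation_list) relation_list) relation_list
    else relation_list) []

-- ===== PORT B =====
-- the while loop of Source B: pop the first group, emit its pairs with every later group, recurse
def altPairLoop : List (List String) → List (List String) → List (List String)
  | [], out => out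
  | former :: rest, out =>
      altPairLoop rest
        (rest.foldl (fun acc last =>
          former.foldl (fun acc f =>
            last.foldl (fun acc l => acc ++ [[f, l]]) acc) acc) out)

def two_twoRelation_alt (nameOrder : List String) (valueOrder : List Int) : List (List String) :=
  let pairs := (PySem.List.enumerate valueOrder 0).map (fun p => (p.2, PySem.List.pyGetD nameOrder p.1 ""))
  let buckets := pairs.foldl (fun d p => d.modify p.1 ([] : List String) (· ++ [p.2])) PySem.Dict.empty
  let groups := (PySem.List.sorted buckets.keys (fun x => x) true).map (fun v => buckets.getD v [])
  altPairLoop groups []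

-- ===== PRECONDITION & SPEC =====
-- Pre_ excludes exactly the inputs with fewer names than values, on which both Pythons raise IndexError.
def Pre_two_twoRelation (nameOrder : List String) (valueOrder : List Int) : Prop :=
  valueOrder.length ≤ nameOrder.length
instance (nameOrder : List String) (valueOrder : List Int) : Decidable (Pre_two_twoRelation nameOrder valueOrder) := by unfold Pre_two_twoRelation; infer_instance
def pvWitness_two_twoRelation : List String × List Int := (["a", "b", "c"], [2, 1, 2])

def Spec_two_twoRelation (nameOrder : List String) (valueOrder : List Int) (out : List (List String)) : Prop := out = two_twoRelation_alt nameOrder valueOrder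
instance (nameOrder : List String) (valueOrder : List Int) (out : List (List String)) : Decidable (Spec_two_twoRelation nameOrder valueOrder out) := by unfold Spec_two_twoRelation; infer_instance

-- ===== CLAIM (what is proved, stated in full; the proofs are below) =====
def Claim_equal_two_twoRelation : Prop := ∀ (nameOrder : List String) (valueOrder : List Int), Dom_two_twoRelation nameOrder valueOrder → Pre_two_twoRelation nameOrder valueOrder → Spec_two_twoRelation nameOrder valueOrder (two_twoRelation nameOrder valueOrder)

-- ===== LEMMAS AND PROOFS =====

-- canonical description of the pair-emission phase
def prodPairs (former last : List String) : List (List String) :=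
  former.flatMap (fun f => last.map (fun l => [f, l]))

def pairsCanon : List (List String) → List (List String)
  | [] => []
  | g :: t => t.flatMap (fun last => prodPairs g last) ++ pairsCanon t

-- canonical group of a value: names at the positions holding that value, in order
def groupOf (nameOrder : List String) (valueOrder : List Int) (v : Int) : List String :=
  ((PySem.List.enumerate valueOrder 0).filter (fun p => v == p.2)).map
    (fun p => PySem.List.pyGetD nameOrder p.1 "")

theorem beq_flip_int (a b : Int) : (a == b) = (b == a) := by
  by_cases h : a = b <;> simp [h]; exact fun hh => h hh.symm

-- ===== pair-phase lemmas (shared canonical form) =====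

theorem inner_emit (last : List String) (f : String) (acc : List (List String)) :
    last.foldl (fun acc l => acc ++ [[f, l]]) acc = acc ++ last.map (fun l => [f, l]) :=
  PySem.List.foldl_append_singleton_eq_map (fun l => [f, l]) last acc

theorem cross_emit (g last : List String) (acc : List (List String)) :
    g.foldl (fun acc f => last.foldl (fun acc l => acc ++ [[f, l]]) acc) acc
      = acc ++ prodPairs g last := by
  simp only [inner_emit]
  exact PySem.List.foldl_append_eq_flatMap _ g acc

theorem suffix_emit (t : List (List String)) (g : List String) (out : List (List String)) :
    t.foldl (fun acc last => g.foldl (fun acc f =>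
        last.foldl (fun acc l => acc ++ [[f, l]]) acc) acc) out
      = out ++ t.flatMap (prodPairs g) := by
  simp only [cross_emit]
  exact PySem.List.foldl_append_eq_flatMap _ t out

theorem altPairLoop_eq (gs : List (List String)) : ∀ out, altPairLoop gs out = out ++ pairsCanon gs := by
  induction gs with
  | nil => intro out; simp [altPairLoop, pairsCanon]
  | cons g t ih =>
    intro out
    show altPairLoop t _ = _
    rw [ih, suffix_emit]
    simp [pairsCanon]

-- A-side pair phase: range-indexed loops over the group list
def bodyA (full : List (List String)) : List (List String) → Int → List (List String) :=
  fun relation_list i =>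
    let former_list := PySem.List.pyGetD full i []
    if i + 1 ≤ (full.length : Int) then
      (PySem.List.pyRange (i + 1) (full.length : Int)).foldl (fun rel index =>
        let last_list := PySem.List.pyGetD full index []
        (PySem.List.pyRange 0 (former_list.length : Int)).foldl (fun rel fi =>
          let fe := PySem.List.pyGetD former_list fi ""
          (PySem.List.pyRange 0 (last_list.length : Int)).foldl (fun rel li =>
            rel ++ [[fe, PySem.List.pyGetD last_list li ""]]) rel) rel) relation_list
    else relation_list

theorem crossA (former last : List String) (rel : List (List String)) :
    (PySem.List.pyRange 0 (former.length : Int)).foldl (fun rel fi =>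
        let fe := PySem.List.pyGetD former fi ""
        (PySem.List.pyRange 0 (last.length : Int)).foldl (fun rel li =>
          rel ++ [[fe, PySem.List.pyGetD last li ""]]) rel) rel
      = rel ++ prodPairs former last := by
  have h2 : ∀ (fe : String) (rel : List (List String)),
      (PySem.List.pyRange 0 (last.length : Int)).foldl (fun rel li =>
        rel ++ [[fe, PySem.List.pyGetD last li ""]]) rel = rel ++ last.map (fun l => [fe, l]) := by
    intro fe rel
    rw [PySem.List.foldl_pyRange_zero_pyGetD' last "" (fun rel l => rel ++ [[fe, l]]) rel,
      PySem.List.foldl_append_singleton_eq_map]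
  have h1 := PySem.List.foldl_pyRange_zero_pyGetD' former ""
      (fun rel fe => (PySem.List.pyRange 0 (last.length : Int)).foldl (fun rel li =>
        rel ++ [[fe, PySem.List.pyGetD last li ""]]) rel) rel
  rw [h1]
  simp only [h2]
  exact PySem.List.foldl_append_eq_flatMap _ former rel

theorem middleA (full : List (List String)) (former : List String) (k : Nat)
    (rel : List (List String)) :
    (PySem.List.pyRange (k : Int) (full.length : Int)).foldl (fun rel index =>
        let last_list := PySem.List.pyGetD full index []
        (PySem.List.pyRange 0 (former.length : Int)).foldl (fun rel fi =>
          let fe := PySem.List.pyGetD former fi ""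
          (PySem.List.pyRange 0 (last_list.length : Int)).foldl (fun rel li =>
            rel ++ [[fe, PySem.List.pyGetD last_list li ""]]) rel) rel) rel
      = rel ++ (full.drop k).flatMap (prodPairs former) := by
  rw [PySem.List.foldl_pyRange_pyGetD' full []
      (fun rel last_list =>
        (PySem.List.pyRange 0 (former.length : Int)).foldl (fun rel fi =>
          let fe := PySem.List.pyGetD former fi ""
          (PySem.List.pyRange 0 (last_list.length : Int)).foldl (fun rel li =>
            rel ++ [[fe, PySem.List.pyGetD last_list li ""]]) rel) rel) rel
      (by positivity)]
  simp only [Int.toNat_natCast, crossA]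
  exact PySem.List.foldl_append_eq_flatMap _ _ rel

theorem outerA (t : List (List String)) : ∀ (pre : List (List String)) (rel : List (List String)),
    (PySem.List.pyRange (pre.length : Int) ((pre ++ t).length : Int)).foldl (bodyA (pre ++ t)) rel
      = rel ++ pairsCanon t := by
  induction t with
  | nil =>
    intro pre rel
    rw [PySem.List.pyRange_one_eq_nil (by simp)]
    simp [pairsCanon]
  | cons g t ih =>
    intro pre rel
    rw [PySem.List.pyRange_one_cons (by simp only [List.length_append, List.length_cons]; push_cast; omega)]
    rw [List.foldl_cons]
    have hget : PySem.List.pyGetD (pre ++ g :: t) ((pre.length : Nat) : Int) [] = g := by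
      rw [PySem.List.pyGetD_natCast]
      rw [List.getD_eq_getElem?_getD, List.getElem?_append_right (Nat.le_refl pre.length)]
      simp
    have hdrop : (pre ++ g :: t).drop (pre.length + 1) = t := by
      rw [List.drop_append]
      simp
    have hb : bodyA (pre ++ g :: t) rel ((pre.length : Nat) : Int)
        = rel ++ t.flatMap (prodPairs g) := by
      show (if ((pre.length : Int) + 1 ≤ ((pre ++ g :: t).length : Int)) then _ else rel) = _
      rw [if_pos (by simp only [List.length_append, List.length_cons]; push_cast; omega)]
      have hcast : ((pre.length : Int) + 1) = ((pre.length + 1 : Nat) : Int) := by push_cast; ring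
      rw [hget, hcast, middleA (pre ++ g :: t) g (pre.length + 1) rel, hdrop]
    rw [hb]
    have hpre : (pre ++ g :: t) = ((pre ++ [g]) ++ t) := by simp
    have hlen : ((pre.length : Int) + 1) = (((pre ++ [g]).length : Nat) : Int) := by
      simp only [List.length_append, List.length_cons, List.length_nil]; push_cast; omega
    rw [hlen]
    calc (PySem.List.pyRange ((pre ++ [g]).length : Int) ((pre ++ g :: t).length : Int)).foldl
            (bodyA (pre ++ g :: t)) (rel ++ t.flatMap (prodPairs g))
        = (PySem.List.pyRange ((pre ++ [g]).length : Int) (((pre ++ [g]) ++ t).length : Int)).foldl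
            (bodyA ((pre ++ [g]) ++ t)) (rel ++ t.flatMap (prodPairs g)) := by rw [← hpre]
      _ = (rel ++ t.flatMap (prodPairs g)) ++ pairsCanon t := ih (pre ++ [g]) _
      _ = rel ++ pairsCanon (g :: t) := by simp [pairsCanon]

theorem pairPhaseA_eq (gs : List (List String)) :
    (PySem.List.pyRange 0 (gs.length : Int)).foldl (bodyA gs) [] = pairsCanon gs := by
  have := outerA gs [] []
  simpa using this

-- ===== grouping-phase lemmas =====

-- A's inner scan over all positions equals the canonical group of cur
theorem innerA_eq (nameOrder : List String) (valueOrder : List Int) (cur : Int) :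
    (PySem.List.pyRange 0 (valueOrder.length : Int)).foldl (fun inner_list i =>
        if cur == PySem.List.pyGetD valueOrder i 0 then
          inner_list ++ [PySem.List.pyGetD nameOrder i ""]
        else inner_list) []
      = groupOf nameOrder valueOrder cur := by
  have henum : PySem.List.enumerate valueOrder 0
      = (PySem.List.pyRange 0 (valueOrder.length : Int)).map
          (fun j => (j, PySem.List.pyGetD valueOrder j 0)) := by
    have := PySem.List.enumerate_eq_map_pyRange valueOrder 0
    simpa [PySem.List.len_eq] using this
  have hfold : (PySem.List.enumerate valueOrder 0).foldl (fun inner_list p =>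
        if cur == p.2 then inner_list ++ [PySem.List.pyGetD nameOrder p.1 ""] else inner_list) []
      = (PySem.List.pyRange 0 (valueOrder.length : Int)).foldl (fun inner_list i =>
        if cur == PySem.List.pyGetD valueOrder i 0 then
          inner_list ++ [PySem.List.pyGetD nameOrder i ""]
        else inner_list) [] := by
    rw [henum, List.foldl_map]
  rw [← hfold]
  have := PySem.List.foldl_append_if (fun p => cur == p.2)
      (fun (p : Int × Int) => PySem.List.pyGetD nameOrder p.1 "")
      (PySem.List.enumerate valueOrder 0) []
  rw [this]
  unfold groupOf
  simp

-- A's grouping phase produces exactly the per-value canonical groups in sorted-descending order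
def groupsAexpr (nameOrder : List String) (valueOrder : List Int) : List (List String) :=
  (PySem.List.pyRange 0 ((PySem.List.sorted (PySem.Set.ofList valueOrder) (fun x => x) true).length : Int)).foldl
    (fun new_nameList index =>
      let cur_value := PySem.List.pyGetD (PySem.List.sorted (PySem.Set.ofList valueOrder) (fun x => x) true) index 0
      let inner_list :=
        (PySem.List.pyRange 0 (valueOrder.length : Int)).foldl (fun inner_list i =>
          if cur_value == PySem.List.pyGetD valueOrder i 0 then
            inner_list ++ [PySem.List.pyGetD nameOrder i ""]
          else inner_list) []
      new_nameList ++ [inner_list]) []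

theorem groupsA_eq (nameOrder : List String) (valueOrder : List Int) :
    groupsAexpr nameOrder valueOrder
    = (PySem.List.sorted (PySem.Set.ofList valueOrder) (fun x => x) true).map
        (groupOf nameOrder valueOrder) := by
  unfold groupsAexpr
  have h := PySem.List.foldl_pyRange_zero_pyGetD'
      (PySem.List.sorted (PySem.Set.ofList valueOrder) (fun x => x) true) 0
      (fun acc cur => acc ++ [(PySem.List.pyRange 0 (valueOrder.length : Int)).foldl (fun inner_list i =>
            if cur == PySem.List.pyGetD valueOrder i 0 then
              inner_list ++ [PySem.List.pyGetD nameOrder i ""]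
            else inner_list) []]) []
  rw [h]
  simp only [innerA_eq]
  exact PySem.List.foldl_append_singleton_eq_map _ _ []

-- B's buckets: keys are the distinct values in first-occurrence order, lookups are the canonical groups
theorem alt_buckets_keys (nameOrder : List String) (valueOrder : List Int) :
    (((PySem.List.enumerate valueOrder 0).map
        (fun p => (p.2, PySem.List.pyGetD nameOrder p.1 ""))).foldl
      (fun d p => d.modify p.1 ([] : List String) (· ++ [p.2])) PySem.Dict.empty).keys
      = PySem.Set.ofList valueOrder := by
  have h : (((PySem.List.enumerate valueOrder 0).map
        (fun p => (p.2, PySem.List.pyGetD nameOrder p.1 ""))).foldl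
      (fun d p => d.modify p.1 ([] : List String) (· ++ [p.2])) PySem.Dict.empty).keys
      = PySem.Set.update (PySem.Dict.empty : PySem.Dict Int (List String)).keys
          (((PySem.List.enumerate valueOrder 0).map
            (fun p => (p.2, PySem.List.pyGetD nameOrder p.1 ""))).map (fun p => p.1)) :=
    PySem.Dict.keys_foldl_modify_key
      (l := ((PySem.List.enumerate valueOrder 0).map
        (fun p => (p.2, PySem.List.pyGetD nameOrder p.1 ""))))
      (key := fun (p : Int × String) => p.1)
      (d0 := ([] : List String))
      (f := fun _ p => (fun x => x ++ [p.2]))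
      (d := PySem.Dict.empty)
  rw [h]
  rw [show (PySem.Dict.empty : PySem.Dict Int (List String)).keys = [] from rfl]
  rw [PySem.Set.update_nil_left, List.map_map]
  congr 1
  exact PySem.List.map_snd_enumerate valueOrder 0

theorem alt_buckets_getD (nameOrder : List String) (valueOrder : List Int) (v : Int) :
    (((PySem.List.enumerate valueOrder 0).map
        (fun p => (p.2, PySem.List.pyGetD nameOrder p.1 ""))).foldl
      (fun d p => d.modify p.1 ([] : List String) (· ++ [p.2])) PySem.Dict.empty).getD v []
      = groupOf nameOrder valueOrder v := by
  rw [PySem.Dict.getD_foldl_modify_append, PySem.Dict.getD_empty]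
  rw [List.filter_map, List.map_map]
  unfold groupOf
  simp only [List.nil_append]
  congr 1
  apply List.filter_congr
  intro p _
  exact beq_flip_int p.2 v

-- ===== canonical forms of the two ports =====

theorem two_twoRelation_eq_pair (nameOrder : List String) (valueOrder : List Int) :
    two_twoRelation nameOrder valueOrder
      = (PySem.List.pyRange 0 ((groupsAexpr nameOrder valueOrder).length : Int)).foldl
          (bodyA (groupsAexpr nameOrder valueOrder)) [] := rfl

theorem two_twoRelation_eq_canon (nameOrder : List String) (valueOrder : List Int) :
    two_twoRelation nameOrder valueOrder =
      pairsCanon ((PySem.List.sorted (PySem.Set.ofList valueOrder) (fun x => x) true).map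
        (groupOf nameOrder valueOrder)) := by
  rw [two_twoRelation_eq_pair, groupsA_eq]
  exact pairPhaseA_eq _

theorem two_twoRelation_alt_eq_canon (nameOrder : List String) (valueOrder : List Int) :
    two_twoRelation_alt nameOrder valueOrder =
      pairsCanon ((PySem.List.sorted (PySem.Set.ofList valueOrder) (fun x => x) true).map
        (groupOf nameOrder valueOrder)) := by
  show altPairLoop _ [] = _
  rw [altPairLoop_eq]
  rw [alt_buckets_keys]
  simp only [alt_buckets_getD]
  simp

-- ===== VERDICT (by name: the statement is the Claim_ definition above) =====
theorem two_twoRelation_spec : Claim_equal_two_twoRelation := by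
  intro nameOrder valueOrder _ _
  unfold Spec_two_twoRelation
  rw [two_twoRelation_eq_canon, two_twoRelation_alt_eq_canon]
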